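-- pv_equiv track=rewrite | github.com/drewtuley/teasers | coinsweeper.py | build_test_map
-- ===== SOURCE A (Python) =====
-- import copy
--
-- def build_test_map(cmap, prod):
--     test_map = copy.copy(cmap)
--     map_idx = 0
--     for c in prod:
--         while test_map[map_idx] != '':
--             map_idx += 1
--         test_map[map_idx] = c
--     return test_map
-- ===== SOURCE B (Python) =====
-- import copy
--
-- def build_test_map(cmap, prod):
--     test_map = copy.copy(cmap)
--     empties = [i for i, v in enumerate(test_map) if v == '']
--     for j, c in enumerate(prod):
--         test_map[empties[j]] = c
--     return test_map
-- ===== Notes on version B (the rewrite author's own statement) =====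
-- stated objective: simpler
-- what changed: B replaces A's stateful cursor with an inner while-scan by two independent passes: first collect the indices of all empty cells, then place each product entry at the j-th collected index.
-- outside the precondition, e.g. on build_test_map(['', 'x', ''], ['', 'a']): A returns ['a', 'x', ''], B returns ['', 'x', 'a']; on build_test_map(['', ''], ['', '', '']): A returns ['', ''], B raises IndexError; on build_test_map(['x'], ['a']): A raises IndexError, B raises IndexError
import Mathlib
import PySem

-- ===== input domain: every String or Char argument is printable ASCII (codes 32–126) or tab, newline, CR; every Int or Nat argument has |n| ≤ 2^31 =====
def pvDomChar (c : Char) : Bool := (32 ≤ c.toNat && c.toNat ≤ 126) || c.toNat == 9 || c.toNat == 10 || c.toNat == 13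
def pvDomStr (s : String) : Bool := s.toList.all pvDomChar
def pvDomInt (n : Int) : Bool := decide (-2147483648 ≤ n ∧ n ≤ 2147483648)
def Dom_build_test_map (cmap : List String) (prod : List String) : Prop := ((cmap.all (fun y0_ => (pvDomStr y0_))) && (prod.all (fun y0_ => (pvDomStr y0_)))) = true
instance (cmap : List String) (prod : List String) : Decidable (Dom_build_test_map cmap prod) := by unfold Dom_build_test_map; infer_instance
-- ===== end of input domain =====

-- B replaces A's stateful cursor + inner while-scan by two independent passes (collect empty indices, then fill); objective: simpler, same cost.


-- ===== PORT A =====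
-- inner 'while test_map[map_idx] != "": map_idx += 1' followed by 'test_map[map_idx] = c'.
-- map_idx starts at 0 and is only ever incremented, so a Nat index is exact; the
-- out-of-range branch (tm[i]? = none) is Python's IndexError, excluded by Pre_.
def pvFindFill (tm : List String) (i : Nat) (c : String) : List String × Nat :=
  if h : i < tm.length then    -- out of range = Python's IndexError, unreachable under Pre_
    if tm[i] ≠ "" then pvFindFill tm (i + 1) c
    else (tm.set i c, i)
  else (tm, i)
termination_by tm.length - i

def build_test_map (cmap : List String) (prod : List String) : List String :=
  (prod.foldl (fun st c => pvFindFill st.1 st.2 c) (cmap, 0)).1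

-- ===== PORT B =====
def build_test_map_alt (cmap : List String) (prod : List String) : List String :=
  let test_map := cmap
  let empties := ((PySem.List.enumerate test_map).filter (fun p => p.2 == "")).map Prod.fst
  ((PySem.List.enumerate prod).foldl (fun tm jc =>
      match PySem.List.pyGet? empties jc.1 with
      | some i => PySem.List.pySetD tm i jc.2
      | none => tm    -- IndexError in Python; unreachable under Pre_
    ) test_map)

-- ===== PRECONDITION & SPEC =====
-- Pre_ excludes (1) products longer than the number of empty cells, where both A and B
-- raise IndexError, and (2) products with an empty string before the last position: there
-- A's stale cursor re-fills the same slot with the following entries while B fills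
-- successive empty slots (and may itself raise) — a degenerate corner on which neither
-- placement is specified.
def Pre_build_test_map (cmap : List String) (prod : List String) : Prop :=
  prod.length ≤ cmap.count "" ∧ "" ∉ prod.dropLast
instance (cmap : List String) (prod : List String) : Decidable (Pre_build_test_map cmap prod) := by unfold Pre_build_test_map; infer_instance

def pvWitness_build_test_map : List String × List String := (["", "x", "", "y", ""], ["a", "b"])

def Spec_build_test_map (cmap : List String) (prod : List String) (out : List String) : Prop := out = build_test_map_alt cmap prod
instance (cmap : List String) (prod : List String) (out : List String) : Decidable (Spec_build_test_map cmap prod out) := by unfold Spec_build_test_map; infer_instance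

-- ===== CLAIM (what is proved, stated in full; the proofs are below) =====
def Claim_equal_build_test_map : Prop := ∀ (cmap : List String) (prod : List String), Dom_build_test_map cmap prod → Pre_build_test_map cmap prod → Spec_build_test_map cmap prod (build_test_map cmap prod)

-- ===== LEMMAS AND PROOFS =====

-- the common specification: place each product entry in the next empty cell, left to right
def pvFill : List String → List String → List String
  | xs, [] => xs
  | [], _ :: _ => []
  | x :: xs, p :: ps => if x = "" then p :: pvFill xs ps else x :: pvFill xs (p :: ps)

-- ---- A-side ----

theorem pvFindFill_shift (xs : List String) (x c : String) :
    ∀ i, pvFindFill (x :: xs) (i + 1) c =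
      ((x :: (pvFindFill xs i c).1, (pvFindFill xs i c).2 + 1)) := by
  suffices H : ∀ n i, xs.length - i ≤ n → pvFindFill (x :: xs) (i + 1) c =
      ((x :: (pvFindFill xs i c).1, (pvFindFill xs i c).2 + 1)) from
    fun i => H _ i le_rfl
  intro n
  induction n with
  | zero =>
    intro i h
    have h1 : ¬ i < xs.length := by omega
    have h2 : ¬ i + 1 < (x :: xs).length := by simp only [List.length_cons]; omega
    rw [pvFindFill, dif_neg h2, pvFindFill, dif_neg h1]
  | succ n ih =>
    intro i h
    by_cases hi : i < xs.length
    · have hlt : i + 1 < (x :: xs).length := by simp only [List.length_cons]; omega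
      have hidx : (x :: xs)[i + 1]'hlt = xs[i]'hi := List.getElem_cons_succ ..
      by_cases hne : xs[i]'hi ≠ ""
      · have hL : pvFindFill (x :: xs) (i + 1) c = pvFindFill (x :: xs) (i + 1 + 1) c := by
          rw [pvFindFill, dif_pos hlt, if_pos (hidx ▸ hne)]
        have hR : pvFindFill xs i c = pvFindFill xs (i + 1) c := by
          rw [pvFindFill, dif_pos hi, if_pos hne]
        rw [hL, hR]
        exact ih (i + 1) (by omega)
      · have hL : pvFindFill (x :: xs) (i + 1) c = ((x :: xs).set (i + 1) c, i + 1) := by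
          rw [pvFindFill, dif_pos hlt, if_neg (hidx ▸ hne)]
        have hR : pvFindFill xs i c = (xs.set i c, i) := by
          rw [pvFindFill, dif_pos hi, if_neg hne]
        rw [hL, hR]
        simp
    · have h2 : ¬ i + 1 < (x :: xs).length := by simp only [List.length_cons]; omega
      rw [pvFindFill, dif_neg h2, pvFindFill, dif_neg hi]

theorem pvFindFill_zero_ne (xs : List String) (x c : String) (hx : x ≠ "") :
    pvFindFill (x :: xs) 0 c = pvFindFill (x :: xs) 1 c := by
  rw [pvFindFill]
  have h0 : 0 < (x :: xs).length := by simp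
  rw [dif_pos h0, if_pos (by simpa using hx)]

def pvArun (tm : List String) (i : Nat) (ps : List String) : List String × Nat :=
  ps.foldl (fun st c => pvFindFill st.1 st.2 c) (tm, i)

theorem pvArun_shift (ps : List String) :
    ∀ (xs : List String) (x : String) (i : Nat),
      pvArun (x :: xs) (i + 1) ps = (x :: (pvArun xs i ps).1, (pvArun xs i ps).2 + 1) := by
  induction ps with
  | nil => intro xs x i; simp [pvArun]
  | cons p ps ih =>
    intro xs x i
    simp only [pvArun, List.foldl_cons]
    rw [pvFindFill_shift]
    exact ih _ _ _

theorem pvArun_cons_ne (ps xs : List String) (x : String) (hx : x ≠ "") :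
    (pvArun (x :: xs) 0 ps).1 = x :: (pvArun xs 0 ps).1 := by
  cases ps with
  | nil => simp [pvArun]
  | cons p ps =>
    simp only [pvArun, List.foldl_cons]
    rw [pvFindFill_zero_ne xs x p hx, pvFindFill_shift]
    have := pvArun_shift ps (pvFindFill xs 0 p).1 x (pvFindFill xs 0 p).2
    simp only [pvArun] at this ⊢
    rw [this]

theorem pvA_eq_fill : ∀ (cmap prod : List String),
    prod.length ≤ cmap.count "" → "" ∉ prod.dropLast →
    (pvArun cmap 0 prod).1 = pvFill cmap prod := by
  intro cmap
  induction cmap with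
  | nil =>
    intro prod hlen _
    have : prod = [] := by
      cases prod with
      | nil => rfl
      | cons p ps => simp at hlen
    subst this
    simp [pvArun, pvFill]
  | cons x xs ih =>
    intro prod hlen hmem
    by_cases hx : x = ""
    · subst hx
      cases prod with
      | nil => simp [pvArun, pvFill]
      | cons p ps =>
        simp only [pvArun, List.foldl_cons]
        rw [pvFindFill, dif_pos (by simp : 0 < (("" : String) :: xs).length), if_neg (by simp)]
        simp only [List.set_cons_zero]
        cases ps with
        | nil => simp [pvFill]
        | cons q qs =>
          have hp : p ≠ "" := fun h => hmem (by simp [List.dropLast_cons₂, h])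
          have h1 : (pvArun (p :: xs) 0 (q :: qs)).1 = p :: (pvArun xs 0 (q :: qs)).1 :=
            pvArun_cons_ne (q :: qs) xs p hp
          simp only [pvArun] at h1
          rw [h1]
          have h2 := ih (q :: qs) (by simpa using hlen)
            (fun h => hmem (by simp [List.dropLast_cons₂, h]))
          simp only [pvArun] at h2
          rw [h2]
          simp [pvFill]
    · have h1 := pvArun_cons_ne prod xs x hx
      rw [h1, ih prod (by simpa [hx] using hlen) hmem]
      cases prod with
      | nil => simp [pvFill]
      | cons p ps => simp [pvFill, hx]

-- ---- B-side ----

def pvE : List String → List Nat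
  | [] => []
  | x :: xs => if x = "" then 0 :: (pvE xs).map (· + 1) else (pvE xs).map (· + 1)

theorem pvEmpties_eq (xs : List String) :
    ∀ s : Nat, ((PySem.List.enumerate xs (s : Int)).filter (fun p => p.2 == "")).map Prod.fst
      = (pvE xs).map (fun n => ((n + s : Nat) : Int)) := by
  induction xs with
  | nil => intro s; simp [PySem.List.enumerate, pvE]
  | cons x xs ih =>
    intro s
    have hcast : ((s : Int) + 1) = ((s + 1 : Nat) : Int) := by push_cast; ring
    rw [PySem.List.enumerate_cons, hcast]
    by_cases hx : x = ""
    · subst hx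
      rw [List.filter_cons_of_pos (by simp)]
      simp only [pvE, if_true, List.map_cons]
      rw [ih (s + 1)]
      simp only [List.map_map, List.cons.injEq]
      refine ⟨by push_cast; ring, List.map_congr_left fun n _ => ?_⟩
      simp only [Function.comp_apply]
      push_cast
      ring
    · rw [List.filter_cons_of_neg (by simpa using hx)]
      simp only [pvE, if_neg hx]
      rw [ih (s + 1), List.map_map]
      apply List.map_congr_left
      intro n _
      simp only [Function.comp_apply]
      push_cast
      ring

def pvGo : List String → List Nat → List String → List String
  | tm, _, [] => tm
  | tm, [], _ :: _ => tm
  | tm, e :: es, p :: ps => pvGo (tm.set e p) es ps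

theorem pvGo_nil_es (tm ps : List String) : pvGo tm [] ps = tm := by
  cases ps <;> simp [pvGo]

theorem pvFoldB_eq_go (ps : List String) :
    ∀ (s : Nat) (tm : List String) (L : List Nat),
      (PySem.List.enumerate ps (s : Int)).foldl (fun tm jc =>
          match PySem.List.pyGet? (List.map (fun (n : Nat) => (n : Int)) L) jc.1 with
          | some i => PySem.List.pySetD tm i jc.2
          | none => tm) tm
        = pvGo tm (L.drop s) ps := by
  induction ps with
  | nil => intro s tm L; simp [PySem.List.enumerate, pvGo]
  | cons p ps ih =>
    intro s tm L
    rw [PySem.List.enumerate_cons, List.foldl_cons]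
    have hcast : ((s : Int) + 1) = ((s + 1 : Nat) : Int) := by push_cast; ring
    rw [hcast]
    cases hL : L[s]? with
    | some i =>
      obtain ⟨hs, hvi⟩ := List.getElem?_eq_some_iff.mp hL
      have hget : PySem.List.pyGet? (List.map (fun (n : Nat) => (n : Int)) L) ((s : Nat) : Int)
          = some ((i : Nat) : Int) := by
        rw [PySem.List.pyGet?_natCast, List.getElem?_map, hL]
        rfl
      simp only [hget]
      rw [PySem.List.pySetD_natCast, ih (s + 1) (tm.set i p) L]
      have hdrop : L.drop s = i :: L.drop (s + 1) := by
        rw [← List.getElem_cons_drop hs, hvi]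
      rw [hdrop]
      rfl
    | none =>
      have hs : L.length ≤ s := by
        by_contra hlt
        exact absurd hL (by simp [List.getElem?_eq_getElem (show s < L.length by omega)])
      have hget : PySem.List.pyGet? (List.map (fun (n : Nat) => (n : Int)) L) ((s : Nat) : Int) = none := by
        rw [PySem.List.pyGet?_natCast, List.getElem?_map,
          List.getElem?_eq_none (by simpa using hs)]
        rfl
      simp only [hget]
      rw [ih (s + 1) tm L, List.drop_eq_nil_of_le hs, List.drop_eq_nil_of_le (by omega)]
      rw [pvGo_nil_es, pvGo_nil_es]

theorem pvGo_shift (ps : List String) :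
    ∀ (es : List Nat) (xs : List String) (y : String),
      pvGo (y :: xs) (es.map (· + 1)) ps = y :: pvGo xs es ps := by
  induction ps with
  | nil => intro es xs y; simp [pvGo]
  | cons p ps ih =>
    intro es xs y
    cases es with
    | nil => simp [pvGo]
    | cons e es =>
      simp only [List.map_cons, pvGo, List.set_cons_succ]
      exact ih es (xs.set e p) y

theorem pvB_eq_fill : ∀ (cmap prod : List String),
    pvGo cmap (pvE cmap) prod = pvFill cmap prod := by
  intro cmap
  induction cmap with
  | nil => intro prod; cases prod <;> simp [pvE, pvGo, pvFill]
  | cons x xs ih =>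
    intro prod
    by_cases hx : x = ""
    · subst hx
      cases prod with
      | nil => simp [pvGo, pvFill]
      | cons p ps =>
        simp only [pvE, if_true, pvGo, List.set_cons_zero]
        rw [pvGo_shift, ih ps]
        simp [pvFill]
    · simp only [pvE, if_neg hx]
      rw [pvGo_shift, ih prod]
      cases prod with
      | nil => simp [pvFill]
      | cons p ps => simp [pvFill, hx]

-- ===== VERDICT (by name: the statement is the Claim_ definition above) =====
theorem build_test_map_spec : Claim_equal_build_test_map := by
  intro cmap prod _ hpre
  unfold Spec_build_test_map build_test_map build_test_map_alt
  have hA := pvA_eq_fill cmap prod hpre.1 hpre.2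
  simp only [pvArun] at hA
  rw [hA]
  show pvFill cmap prod = List.foldl (fun tm jc =>
      match PySem.List.pyGet? (List.map Prod.fst
          (List.filter (fun p => p.2 == "") (PySem.List.enumerate cmap 0))) jc.1 with
      | some i => PySem.List.pySetD tm i jc.2
      | none => tm) cmap (PySem.List.enumerate prod 0)
  have hE := pvEmpties_eq cmap 0
  simp only [Nat.cast_zero, Nat.add_zero] at hE
  rw [hE]
  have hmap : (fun n => ((n + 0 : Nat) : Int)) = (fun (n : Nat) => (n : Int)) := by
    funext n
    simp
  have hB := pvFoldB_eq_go prod 0 cmap (pvE cmap)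
  simp only [Nat.cast_zero, List.drop_zero] at hB
  rw [hB, pvB_eq_fill]
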